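-- pv_equiv track=rewrite | github.com/AutonomosCdM/farm_manager | src_backup/resource_management.py | resolve_assignment_conflicts
-- ===== SOURCE A (Python) =====
-- def resolve_assignment_conflicts(resource_manager, assignments, priorities):
--     """Resolve conflicts in resource assignments based on task priorities."""
--     # Find machines assigned to multiple tasks
--     machine_to_tasks = {}
--     for task_id, machine_id in assignments.items():
--         if machine_id not in machine_to_tasks:
--             machine_to_tasks[machine_id] = []
--         machine_to_tasks[machine_id].append(task_id)
--
--     # Resolve conflicts
--     resolved_assignments = assignments.copy()
--     for machine_id, task_ids in machine_to_tasks.items():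
--         if len(task_ids) > 1:
--             # Sort tasks by priority
--             sorted_tasks = sorted(task_ids, key=lambda t: priorities.get(t, 0), reverse=True)
--
--             # Keep assignment for highest priority task
--             highest_priority_task = sorted_tasks[0]
--
--             # Remove assignments for lower priority tasks
--             for task_id in sorted_tasks[1:]:
--                 resolved_assignments.pop(task_id)
--
--     return resolved_assignments
-- ===== SOURCE B (Python) =====
-- def resolve_assignment_conflicts(resource_manager, assignments, priorities):
--     """Resolve conflicts in resource assignments based on task priorities."""
--     # One pass: per machine keep the earliest task with strictly greatest priority.
--     winner = {}
--     for task_id, machine_id in assignments.items():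
--         if machine_id not in winner or priorities.get(task_id, 0) > priorities.get(winner[machine_id], 0):
--             winner[machine_id] = task_id
--     # Second pass: keep only winning assignments, preserving original order.
--     return {task_id: machine_id for task_id, machine_id in assignments.items()
--             if winner[machine_id] == task_id}
-- ===== Notes on version B (the rewrite author's own statement) =====
-- stated objective: simpler
-- what changed: Replaces group-by-machine + stable reverse sort + copy-and-pop with two plain passes: a single strict-'>' scan that records each machine's earliest highest-priority task, then a filter of the original assignments keeping only winners.
import Mathlib
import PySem

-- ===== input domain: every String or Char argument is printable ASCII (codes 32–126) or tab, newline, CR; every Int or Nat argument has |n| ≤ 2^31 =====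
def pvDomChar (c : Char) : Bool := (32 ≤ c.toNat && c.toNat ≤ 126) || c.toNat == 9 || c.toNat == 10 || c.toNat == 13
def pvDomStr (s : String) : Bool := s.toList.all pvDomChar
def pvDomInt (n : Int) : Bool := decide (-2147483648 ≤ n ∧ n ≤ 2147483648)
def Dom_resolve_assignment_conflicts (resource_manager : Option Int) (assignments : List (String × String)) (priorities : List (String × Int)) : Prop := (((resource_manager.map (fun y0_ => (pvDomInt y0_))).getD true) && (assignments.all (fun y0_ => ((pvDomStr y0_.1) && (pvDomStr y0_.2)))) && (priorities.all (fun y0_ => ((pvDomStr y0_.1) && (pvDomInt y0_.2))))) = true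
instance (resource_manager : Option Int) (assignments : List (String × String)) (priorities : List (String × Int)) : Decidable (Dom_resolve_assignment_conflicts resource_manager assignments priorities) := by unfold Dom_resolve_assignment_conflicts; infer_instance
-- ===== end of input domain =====

-- B replaces A's group-by-machine + stable reverse sort + copy-and-pop with one strict-'>' scan
-- recording each machine's earliest highest-priority task and a filter of the original assignments
-- (simpler decomposition; return value only, neither mutates its arguments).

-- ===== PORT A =====
def resolve_assignment_conflicts (resource_manager : Option Int) (assignments : List (String × String)) (priorities : List (String × Int)) : List (String × String) :=
  -- machine_to_tasks[machine_id].append(task_id)  (the 'not in' + [] initialisation is Dict.modify with default [])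
  let machine_to_tasks : PySem.Dict String (List String) :=
    assignments.foldl (fun d p => d.modify p.2 [] (fun ts => ts ++ [p.1])) PySem.Dict.empty
  let prio : PySem.Dict String Int := PySem.Dict.mk priorities
  -- resolved_assignments = assignments.copy(); pop lower-priority tasks
  let resolved : PySem.Dict String String :=
    machine_to_tasks.items.foldl (fun res x =>
      if 1 < x.2.length then
        let sorted_tasks := PySem.List.sorted x.2 (fun t => prio.getD t 0) true
        sorted_tasks.tail.foldl (fun r t => r.erase t) res
      else res) (PySem.Dict.mk assignments)
  resolved.items

-- ===== PORT B =====
def resolve_assignment_conflicts_alt (resource_manager : Option Int) (assignments : List (String × String)) (priorities : List (String × Int)) : List (String × String) :=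
  let prio : PySem.Dict String Int := PySem.Dict.mk priorities
  let winner : PySem.Dict String String :=
    assignments.foldl (fun w p =>
      match w.get? p.2 with
      | none => w.insert p.2 p.1
      | some c => if prio.getD p.1 0 > prio.getD c 0 then w.insert p.2 p.1 else w)
      PySem.Dict.empty
  assignments.filter (fun p => winner.get? p.2 == some p.1)

-- ===== PRECONDITION & SPEC =====
-- Pre_ states only that the two association lists really represent Python dicts (duplicate-free
-- keys); a duplicate-key list corresponds to no dict input of A, so nothing A returns on is excluded.
def Pre_resolve_assignment_conflicts (resource_manager : Option Int) (assignments : List (String × String)) (priorities : List (String × Int)) : Prop :=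
  (assignments.map Prod.fst).Nodup ∧ (priorities.map Prod.fst).Nodup
instance (resource_manager : Option Int) (assignments : List (String × String)) (priorities : List (String × Int)) : Decidable (Pre_resolve_assignment_conflicts resource_manager assignments priorities) := by unfold Pre_resolve_assignment_conflicts; infer_instance
def pvWitness_resolve_assignment_conflicts : Option Int × (List (String × String)) × (List (String × Int)) :=
  (some 1, [("t1", "m1"), ("t2", "m1"), ("t3", "m2")], [("t1", 1), ("t2", 5)])
def Spec_resolve_assignment_conflicts (resource_manager : Option Int) (assignments : List (String × String)) (priorities : List (String × Int)) (out : List (String × String)) : Prop := out = resolve_assignment_conflicts_alt resource_manager assignments priorities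
instance (resource_manager : Option Int) (assignments : List (String × String)) (priorities : List (String × Int)) (out : List (String × String)) : Decidable (Spec_resolve_assignment_conflicts resource_manager assignments priorities out) := by unfold Spec_resolve_assignment_conflicts; infer_instance

-- ===== CLAIM (what is proved, stated in full; the proofs are below) =====
def Claim_equal_resolve_assignment_conflicts : Prop := ∀ (resource_manager : Option Int) (assignments : List (String × String)) (priorities : List (String × Int)), Dom_resolve_assignment_conflicts resource_manager assignments priorities → Pre_resolve_assignment_conflicts resource_manager assignments priorities → Spec_resolve_assignment_conflicts resource_manager assignments priorities (resolve_assignment_conflicts resource_manager assignments priorities)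

-- ===== LEMMAS AND PROOFS =====

-- the strict-'>' "best so far" step; both programs per machine reduce to folding it
def pvBestStep (key : String → Int) (o : Option String) (t : String) : Option String :=
  match o with
  | none => some t
  | some c => if key c < key t then some t else some c

-- tasks of machine m, in assignment order
def pvGrp (as : List (String × String)) (m : String) : List String :=
  (as.filter (fun p => p.2 == m)).map Prod.fst

-- losers of one machine_to_tasks item, as A computes them
def pvLosers (key : String → Int) (x : String × List String) : List String :=
  if 1 < x.2.length then (PySem.List.sorted x.2 key true).tail else []

theorem pv_head_insertBy (key : String → Int) (x : String) (acc : List String) :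
    (PySem.List.insertBy (fun a b => decide (key b < key a)) x acc).head? =
      pvBestStep key acc.head? x := by
  cases acc with
  | nil => rfl
  | cons y ys =>
      simp only [PySem.List.insertBy, pvBestStep]
      split <;> simp_all

theorem pv_head_foldl_insertBy (key : String → Int) (ts : List String) (acc : List String) :
    ((ts.foldl (fun a x => PySem.List.insertBy (fun a b => decide (key b < key a)) x a) acc).head?) =
      ts.foldl (pvBestStep key) acc.head? := by
  induction ts generalizing acc with
  | nil => rfl
  | cons t ts ih => simp [List.foldl_cons, ih, pv_head_insertBy]

theorem pv_head_sorted_rev (key : String → Int) (ts : List String) :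
    (PySem.List.sorted ts key true).head? = ts.foldl (pvBestStep key) none := by
  rw [PySem.List.sorted_rev_eq_foldl_insertBy]
  exact pv_head_foldl_insertBy key ts []

theorem pv_m2t_getD (as : List (String × String)) (m : String) :
    ((as.foldl (fun d p => d.modify p.2 [] (fun ts => ts ++ [p.1])) PySem.Dict.empty).getD m []) = pvGrp as m := by
  have h : as.foldl (fun d p => d.modify p.2 [] (fun ts => ts ++ [p.1])) PySem.Dict.empty
      = (as.map Prod.swap).foldl (fun d q => d.modify q.1 [] (fun ts => ts ++ [q.2])) PySem.Dict.empty := by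
    rw [List.foldl_map]
    rfl
  rw [h, PySem.Dict.getD_foldl_modify_append]
  simp [pvGrp, List.filter_map, Function.comp_def, Prod.swap]

-- erase loop = filter on keys not erased
theorem pv_erase_foldl (ks : List String) (d : PySem.Dict String String) :
    (ks.foldl (fun r t => r.erase t) d).items =
      d.items.filter (fun p => decide (p.1 ∉ ks)) := by
  induction ks generalizing d with
  | nil => simp
  | cons k ks ih =>
      rw [List.foldl_cons, ih]
      simp only [PySem.Dict.erase, List.filter_filter]
      apply List.filter_congr
      intro p _
      by_cases h1 : p.1 = k <;> by_cases h2 : p.1 ∈ ks <;> simp [h1, h2]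

-- A's whole resolution loop = one filter
theorem pv_resolve_foldl (key : String → Int) (L : List (String × List String)) (d : PySem.Dict String String) :
    (L.foldl (fun res x =>
        if 1 < x.2.length then
          (PySem.List.sorted x.2 key true).tail.foldl (fun r t => r.erase t) res
        else res) d).items =
      d.items.filter (fun p => L.all (fun x => decide (p.1 ∉ pvLosers key x))) := by
  induction L generalizing d with
  | nil => simp
  | cons x L ih =>
      simp only [List.foldl_cons, ih]
      by_cases hx : 1 < x.2.length
      · simp only [hx, if_pos, pv_erase_foldl, List.filter_filter]
        apply List.filter_congr
        intro p _
        simp [pvLosers, hx, Bool.and_comm]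
      · simp only [hx, if_neg, not_false_iff]
        apply List.filter_congr
        intro p _
        simp [pvLosers, hx]

-- B's winner dictionary, per machine
theorem pv_winner_get? (key : String → Int) (prio : PySem.Dict String Int)
    (hkey : ∀ t, key t = prio.getD t 0)
    (l : List (String × String)) (w : PySem.Dict String String) (m : String) :
    ((l.foldl (fun w p =>
        match w.get? p.2 with
        | none => w.insert p.2 p.1
        | some c => if prio.getD p.1 0 > prio.getD c 0 then w.insert p.2 p.1 else w) w).get? m) =
      (pvGrp l m).foldl (pvBestStep key) (w.get? m) := by
  induction l generalizing w with
  | nil => rfl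
  | cons p l ih =>
      simp only [List.foldl_cons, ih]
      by_cases hm : p.2 = m
      · subst hm
        have hg : pvGrp (p :: l) p.2 = p.1 :: pvGrp l p.2 := by
          simp [pvGrp, List.filter_cons]
        rw [hg, List.foldl_cons]
        congr 1
        cases hw : w.get? p.2 with
        | none => simp [hw, PySem.Dict.get?_insert_self, pvBestStep]
        | some c =>
            simp only [hw, pvBestStep, gt_iff_lt, hkey]
            by_cases hc : prio.getD c 0 < prio.getD p.1 0
            · simp [hc, PySem.Dict.get?_insert_self]
            · simp [hc, hw]
      · have hg : pvGrp (p :: l) m = pvGrp l m := by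
          simp [pvGrp, List.filter_cons, hm]
        rw [hg]
        congr 1
        have hne : m ≠ p.2 := Ne.symm hm
        cases hw : w.get? p.2 with
        | none => simp [PySem.Dict.get?_insert, hne]
        | some c =>
            simp only [hw]
            split
            · simp [PySem.Dict.get?_insert, hne]
            · rfl

-- per machine: surviving A's pops = being B's winner
theorem pv_keep_iff (key : String → Int) (ts : List String) (t m : String)
    (hmem : t ∈ ts) (hnd : ts.Nodup) :
    (t ∉ pvLosers key (m, ts)) ↔ ts.foldl (pvBestStep key) none = some t := by
  have hhead := pv_head_sorted_rev key ts
  by_cases hlen : 1 < ts.length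
  · have hperm := PySem.List.sorted_perm ts key true
    have hnd' : (PySem.List.sorted ts key true).Nodup := hperm.nodup_iff.mpr hnd
    have hne : PySem.List.sorted ts key true ≠ [] := by
      intro h
      rw [PySem.List.sorted_eq_nil_iff] at h
      simp [h] at hmem
    obtain ⟨h, r, hr⟩ := List.exists_cons_of_ne_nil hne
    have htmem : t ∈ PySem.List.sorted ts key true := (PySem.List.mem_sorted ts key true t).mpr hmem
    rw [hr] at hhead htmem hnd'
    simp only [List.head?_cons] at hhead
    rw [← hhead]
    simp only [pvLosers, hlen, if_pos, hr, List.tail_cons]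
    simp only [List.mem_cons, List.nodup_cons] at htmem hnd'
    constructor
    · intro hnr
      rcases htmem with h1 | h1
      · simp [h1]
      · exact absurd h1 hnr
    · intro he hmemr
      have : h = t := by simpa using he
      exact hnd'.1 (this ▸ hmemr)
  · have : ts = [t] := by
      cases ts with
      | nil => simp at hmem
      | cons a l =>
          cases l with
          | nil => simp at hmem; simp [hmem]
          | cons b l2 => simp at hlen
    subst this
    simp [pvLosers, pvBestStep]

-- a member of a group determines its machine (under Nodup keys)
theorem pv_grp_mem (as : List (String × String)) (m t : String) :
    t ∈ pvGrp as m → (t, m) ∈ as := by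
  intro h
  simp only [pvGrp, List.mem_map, List.mem_filter] at h
  obtain ⟨p, ⟨hp, hpm⟩, hpt⟩ := h
  have : p = (t, m) := by
    cases p; simp_all
  exact this ▸ hp

theorem pv_grp_nodup (as : List (String × String)) (m : String)
    (hnd : (as.map Prod.fst).Nodup) : (pvGrp as m).Nodup := by
  unfold pvGrp
  have hsub : ((as.filter (fun p => p.2 == m)).map Prod.fst).Sublist (as.map Prod.fst) :=
    (List.filter_sublist (l := as)).map Prod.fst
  exact hsub.nodup hnd

-- ===== VERDICT (by name: the statement is the Claim_ definition above) =====
theorem resolve_assignment_conflicts_spec : Claim_equal_resolve_assignment_conflicts := by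
  intro rm as pri _ hpre
  unfold Spec_resolve_assignment_conflicts resolve_assignment_conflicts resolve_assignment_conflicts_alt
  obtain ⟨hnda, _⟩ := hpre
  set prio : PySem.Dict String Int := PySem.Dict.mk pri with hprio
  set key : String → Int := fun t => prio.getD t 0 with hkey
  -- the machine_to_tasks dictionary
  set m2t : PySem.Dict String (List String) :=
    as.foldl (fun d p => d.modify p.2 [] (fun ts => ts ++ [p.1])) PySem.Dict.empty with hm2t
  have hkeys : m2t.keys = PySem.Set.update (PySem.Dict.empty : PySem.Dict String (List String)).keys (as.map (fun p => p.2)) := by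
    rw [hm2t]
    exact PySem.Dict.keys_foldl_modify_key as (fun p => p.2) [] (fun _ p ts => ts ++ [p.1]) PySem.Dict.empty
  have hknd : m2t.keys.Nodup := by
    rw [hm2t]
    exact PySem.Dict.nodup_keys_foldl_modify_key as (fun p => p.2) [] (fun _ p ts => ts ++ [p.1]) PySem.Dict.empty (by simp)
  have hitems : m2t.items = m2t.keys.map (fun k => (k, pvGrp as k)) := by
    rw [PySem.Dict.items_eq_map_keys m2t hknd []]
    apply List.map_congr_left
    intro k _
    rw [hm2t, pv_m2t_getD]
  rw [pv_resolve_foldl key]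
  have hd0 : (PySem.Dict.mk as).items = as := rfl
  rw [hd0]
  apply List.filter_congr
  intro p hp
  rw [hitems, List.all_map]
  simp only [Function.comp_def]
  rw [pv_winner_get? key prio (fun t => rfl) as PySem.Dict.empty p.2]
  have hgm : p.2 ∈ m2t.keys := by
    rw [hkeys]
    rw [PySem.Set.mem_update]
    right
    exact List.mem_map_of_mem hp
  have hpg : p.1 ∈ pvGrp as p.2 := by
    simp only [pvGrp, List.mem_map, List.mem_filter]
    exact ⟨p, ⟨hp, by simp⟩, rfl⟩
  have hkeep := pv_keep_iff key (pvGrp as p.2) p.1 p.2 hpg (pv_grp_nodup as p.2 hnda)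
  have honly : ∀ m ∈ m2t.keys, p.1 ∈ pvLosers key (m, pvGrp as m) → m = p.2 := by
    intro m _ hl
    have hmem : p.1 ∈ pvGrp as m := by
      unfold pvLosers at hl
      split at hl
      · have := List.mem_of_mem_tail hl
        exact (PySem.List.mem_sorted _ key true p.1).mp this
      · simp at hl
    have h1 : (p.1, m) ∈ as := pv_grp_mem as m p.1 hmem
    have h2 : (p.1, p.2) ∈ as := hp
    -- Nodup on first components forces equal pairs
    have := List.inj_on_of_nodup_map hnda
    have heq : (p.1, m) = (p.1, p.2) := by
      apply this h1 h2
      rfl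
    simpa using congrArg Prod.snd heq
  rw [PySem.Dict.get?_empty]
  by_cases hw : (pvGrp as p.2).foldl (pvBestStep key) none = some p.1
  · have h1 : p.1 ∉ pvLosers key (p.2, pvGrp as p.2) := hkeep.mpr hw
    have : m2t.keys.all (fun m => decide (p.1 ∉ pvLosers key (m, pvGrp as m))) = true := by
      rw [List.all_eq_true]
      intro m hm
      simp only [decide_eq_true_eq]
      intro hcon
      exact h1 ((honly m hm hcon) ▸ hcon)
    rw [this, hw]
    simp
  · have h1 : p.1 ∈ pvLosers key (p.2, pvGrp as p.2) := by
      by_contra hc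
      exact hw (hkeep.mp hc)
    have : m2t.keys.all (fun m => decide (p.1 ∉ pvLosers key (m, pvGrp as m))) = false := by
      rw [List.all_eq_false]
      exact ⟨p.2, hgm, by simpa using h1⟩
    rw [this]
    cases hv : (pvGrp as p.2).foldl (pvBestStep key) none with
    | none => simp
    | some v =>
        have : v ≠ p.1 := fun h => hw (h ▸ hv)
        simp [this]
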